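-- pv_equiv track=rewrite | github.com/ASSERT-KTH/DET-Gen | experiments/pynguin/c4b/single-return/generated_tests/src_519/8/src_519.py | func
-- ===== SOURCE A (Python) =====
-- def func(*args):
--
-- 	import math
-- 	nStr = args[0]
-- 	n = int(nStr)
-- 	nameList = ['Sheldon', 'Leonard', 'Penny', 'Rajesh', 'Howard']
-- 	i = 1
-- 	while (n > (5 * i)):
-- 	    n = (n - (5 * i))
-- 	    i = (i * 2)
-- 	j = 0
-- 	while (n > i):
-- 	    n = (n - i)
-- 	    j = (j + 1)
-- 	return(nameList[j])
-- ===== SOURCE B (Python) =====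
-- def func(*args):
--     nStr = args[0]
--     n = int(nStr)
--     nameList = ['Sheldon', 'Leonard', 'Penny', 'Rajesh', 'Howard']
--     if n <= 0:
--         return nameList[0]
--     c = (n + 4) // 5              # ceil(n/5): number of the 5-name block position
--     m = c.bit_length() - 1        # group index: smallest m with n <= 5*(2**(m+1)-1)
--     i = 1 << m                    # group width per name
--     r = n - 5 * (i - 1)           # residual position inside the group (>= 1)
--     return nameList[(r - 1) // i]
-- ===== Notes on version B (the rewrite author's own statement) =====
-- stated objective: faster
-- what changed: Replaced both scanning while-loops with a closed-form computation: the group is found by integer bit_length of ceil(n/5) and the name index by one floor division, instead of iteratively doubling and subtracting.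
import Mathlib
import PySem

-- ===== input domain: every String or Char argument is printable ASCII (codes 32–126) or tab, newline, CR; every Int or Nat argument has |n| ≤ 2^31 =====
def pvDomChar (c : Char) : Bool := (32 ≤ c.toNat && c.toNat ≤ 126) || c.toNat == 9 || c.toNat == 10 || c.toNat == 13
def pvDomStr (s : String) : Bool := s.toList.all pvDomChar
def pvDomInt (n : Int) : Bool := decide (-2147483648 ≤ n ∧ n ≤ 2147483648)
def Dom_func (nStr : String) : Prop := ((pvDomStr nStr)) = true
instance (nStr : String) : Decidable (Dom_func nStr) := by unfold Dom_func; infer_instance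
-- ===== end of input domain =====

-- B replaces A's two scanning while-loops by a closed-form computation of the group (via
-- integer bit_length) and the name index (one floor division); objective: faster.

-- ===== PORT A =====
def pvNameList : List String := ["Sheldon", "Leonard", "Penny", "Rajesh", "Howard"]

-- first while-loop: while n > 5*i: n -= 5*i; i *= 2   (the '0 < i' conjunct only
-- makes the recursion total; in A, i starts at 1 and doubles, so it is always true)
def pvLoop1 (n i : Int) : Int × Int :=
  if h : 0 < i ∧ 5 * i < n then pvLoop1 (n - 5 * i) (i * 2) else (n, i)
termination_by n.toNat
decreasing_by omega

-- second while-loop: while n > i: n -= i; j += 1   (same totality guard)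
def pvLoop2 (n i j : Int) : Int :=
  if h : 0 < i ∧ i < n then pvLoop2 (n - i) i (j + 1) else j
termination_by n.toNat
decreasing_by omega

def func (nStr : String) : String :=
  match PySem.Int.ofStr? nStr with
  | none => ""          -- int(nStr) raises ValueError; excluded by Pre_func
  | some n =>
      let p := pvLoop1 n 1
      let j := pvLoop2 p.1 p.2 0
      (PySem.List.pyGet? pvNameList j).getD ""   -- j always lands in 0..4, so never none

-- ===== PORT B =====
def func_alt (nStr : String) : String :=
  match PySem.Int.ofStr? nStr with
  | none => ""          -- int(nStr) raises ValueError; excluded by Pre_func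
  | some n =>
      if n ≤ 0 then (PySem.List.pyGet? pvNameList 0).getD ""
      else
        let c := PySem.Int.floordiv (n + 4) 5
        let m := PySem.Int.bitLength c - 1     -- c.bit_length() - 1
        let i : Int := 2 ^ m                   -- 1 << m
        let r := n - 5 * (i - 1)
        (PySem.List.pyGet? pvNameList (PySem.Int.floordiv (r - 1) i)).getD ""

-- ===== PRECONDITION & SPEC =====
-- Pre_func: exactly the inputs int() accepts; on any other string A raises ValueError.
def Pre_func (nStr : String) : Prop := (PySem.Int.ofStr? nStr).isSome = true
instance (nStr : String) : Decidable (Pre_func nStr) := by unfold Pre_func; infer_instance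
def pvWitness_func : String := "52"

def Spec_func (nStr : String) (out : String) : Prop := out = func_alt nStr
instance (nStr : String) (out : String) : Decidable (Spec_func nStr out) := by unfold Spec_func; infer_instance

-- ===== CLAIM (what is proved, stated in full; the proofs are below) =====
def Claim_equal_func : Prop := ∀ (nStr : String), Dom_func nStr → Pre_func nStr → Spec_func nStr (func nStr)

-- ===== LEMMAS AND PROOFS =====

-- characterisation of the first loop: starting from (n - 5*(2^m - 1), 2^m) it stops at the
-- unique group M ≥ m with 5*(2^M - 1) < n ≤ 5*(2^(M+1) - 1)
lemma pvLoop1_run : ∀ (k m : Nat) (n : Int), (n - 5 * ((2:Int) ^ m - 1)).toNat ≤ k →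
    5 * ((2:Int) ^ m - 1) < n →
    ∃ M : Nat, m ≤ M ∧ 5 * ((2:Int) ^ M - 1) < n ∧ n ≤ 5 * ((2:Int) ^ (M + 1) - 1) ∧
      pvLoop1 (n - 5 * ((2:Int) ^ m - 1)) ((2:Int) ^ m) = (n - 5 * ((2:Int) ^ M - 1), (2:Int) ^ M) := by
  intro k
  induction k with
  | zero =>
      intro m n hk h
      omega
  | succ k ih =>
      intro m n hk h
      have hpow : (0:Int) < 2 ^ m := by positivity
      have hpow2 : (2:Int) ^ (m + 1) = 2 ^ m * 2 := by ring
      rw [pvLoop1]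
      by_cases hc : 5 * (2:Int) ^ m < n - 5 * ((2:Int) ^ m - 1)
      · -- loop continues: recurse at group m+1
        rw [dif_pos ⟨hpow, hc⟩]
        have harg : n - 5 * ((2:Int) ^ m - 1) - 5 * 2 ^ m = n - 5 * ((2:Int) ^ (m + 1) - 1) := by
          rw [hpow2]; ring
        have h' : 5 * ((2:Int) ^ (m + 1) - 1) < n := by rw [hpow2]; omega
        have hk' : (n - 5 * ((2:Int) ^ (m + 1) - 1)).toNat ≤ k := by
          rw [hpow2]; rw [hpow2] at h'; omega
        obtain ⟨M, hmM, h1, h2, heq⟩ := ih (m + 1) n hk' h'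
        refine ⟨M, by omega, h1, h2, ?_⟩
        rw [harg, ← hpow2, ← heq]
      · -- loop stops: M = m
        rw [dif_neg (by tauto)]
        refine ⟨m, le_refl m, h, ?_, rfl⟩
        rw [hpow2]; omega

-- characterisation of the second loop: it counts ⌊(n-1)/i⌋ subtractions
lemma pvLoop2_run : ∀ (k : Nat) (n i j : Int), n.toNat ≤ k → 0 < i → 0 < n →
    pvLoop2 n i j = j + (n - 1) / i := by
  intro k
  induction k with
  | zero => intro n i j hk hi hn; omega
  | succ k ih =>
      intro n i j hk hi hn
      rw [pvLoop2]
      by_cases hc : i < n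
      · rw [dif_pos ⟨hi, hc⟩]
        rw [ih (n - i) i (j + 1) (by omega) hi (by omega)]
        rw [show n - 1 = (n - i - 1) + 1 * i by ring,
            Int.add_mul_ediv_right _ _ (by omega : i ≠ 0)]
        ring
      · rw [dif_neg (by tauto)]
        rw [Int.ediv_eq_zero_of_lt (by omega) (by omega)]
        ring

-- bit_length is determined by a power-of-two bracket
lemma pvBitLength_eq (c : Int) (M : Nat) (h1 : (2:Int) ^ M ≤ c) (h2 : c < 2 ^ (M + 1)) :
    PySem.Int.bitLength c = M + 1 := by
  have hc : 0 < c := lt_of_lt_of_le (by positivity) h1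
  have hcast1 : ((2 ^ M : Nat) : Int) ≤ c := by push_cast; exact h1
  have hcast2 : c < ((2 ^ (M + 1) : Nat) : Int) := by push_cast; exact h2
  have habs : c.natAbs = c.toNat := Int.natAbs_of_nonneg (le_of_lt hc) ▸ rfl
  have hlo : 2 ^ M ≤ c.natAbs := by omega
  have hhi : c.natAbs < 2 ^ (M + 1) := by omega
  have hne : c ≠ 0 := by omega
  have hub := PySem.Int.lt_two_pow_bitLength c
  have hlb := PySem.Int.two_pow_bitLength_le c hne
  set b := PySem.Int.bitLength c with hb
  have hb1 : 1 ≤ b := by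
    by_contra hcon
    have : b = 0 := by omega
    rw [this] at hub
    simp at hub
    omega
  have hMb : M < b := by
    by_contra hcon
    have : b ≤ M := by omega
    exact absurd (lt_of_le_of_lt hlo hub)
      (not_lt.mpr (Nat.pow_le_pow_right (by norm_num) this))
  have hbM : b - 1 < M + 1 := by
    by_contra hcon
    have : M + 1 ≤ b - 1 := by omega
    exact absurd (lt_of_le_of_lt hlb hhi)
      (not_lt.mpr (Nat.pow_le_pow_right (by norm_num) this))
  omega

-- ===== VERDICT (by name: the statement is the Claim_ definition above) =====
theorem func_spec : Claim_equal_func := by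
  intro nStr _ hpre
  unfold Spec_func func func_alt
  cases hN : PySem.Int.ofStr? nStr with
  | none => rfl
  | some n =>
      simp only []
      by_cases hn : n ≤ 0
      · -- both loops do nothing; both sides read index 0
        rw [if_pos hn]
        rw [pvLoop1, dif_neg (by omega)]
        rw [pvLoop2, dif_neg (by omega)]
      · rw [if_neg hn]
        have hn' : 0 < n := by omega
        -- run the first loop from group 0
        obtain ⟨M, _, h1, h2, heq⟩ :=
          pvLoop1_run (n - 5 * ((2:Int) ^ 0 - 1)).toNat 0 n (le_refl _) (by norm_num; omega)
        have hstart : n - 5 * ((2:Int) ^ 0 - 1) = n := by norm_num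
        have hone : ((2:Int) ^ 0) = 1 := by norm_num
        rw [hstart, hone] at heq
        have hpowM : (0:Int) < 2 ^ M := by positivity
        have hpow2 : (2:Int) ^ (M + 1) = 2 ^ M * 2 := by ring
        have hr : 0 < n - 5 * ((2:Int) ^ M - 1) := by omega
        rw [heq]
        -- second loop
        rw [pvLoop2_run (n - 5 * ((2:Int) ^ M - 1)).toNat _ _ 0 (le_refl _) hpowM hr]
        -- B side: c = (n+4)/5 lies in [2^M, 2^(M+1))
        have h5 : (0:Int) < 5 := by norm_num
        rw [PySem.Int.floordiv_eq_ediv_of_pos h5]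
        have hcl : (2:Int) ^ M ≤ (n + 4) / 5 :=
          (Int.le_ediv_iff_mul_le h5).mpr (by omega)
        have hcu : (n + 4) / 5 < (2:Int) ^ (M + 1) :=
          (Int.ediv_lt_iff_lt_mul h5).mpr (by rw [hpow2] at h2 ⊢; omega)
        rw [pvBitLength_eq _ M hcl hcu]
        simp only [Nat.add_sub_cancel]
        rw [PySem.Int.floordiv_eq_ediv_of_pos hpowM]
        ring_nf
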